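-- pv_equiv track=rewrite | github.com/alex22prok/Multilang_Segmentation | subtractive.py | build_lexicon
-- ===== SOURCE A (Python) =====
-- def build_lexicon(utts):
--     """The core lexicon-building algorithm. Returns a dictionary of words with their scores"""
--     lexicon = {}
--     # Utterance loop
--     for utt in utts:
--         # Subtraction loop
--         remainder = utt
--         while remainder:
--             # Get all the possible subtractions
--             matchedwords = set()
--             syllindices = [i for i, syllseg in enumerate(remainder) if syllseg == "."]
--             for i in syllindices:
--                 candidate = remainder[:i].strip()
--                 if candidate in lexicon:
--                     matchedwords.add(candidate)
--             # Do subtraction and lexicon updating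
--             if matchedwords: # If at least one subtraction is found
--                 # Get the best one
--                 beststartword = get_bestmatch(matchedwords, lexicon)
--                 # Do the subtraction
--                 remainder = subtract(beststartword, remainder)
--                 # Update the subtracted word in the lexicon
--                 update_lexicon(lexicon, beststartword)
--             else: # No subtraction was found
--                 # Update the lexicon with the remainer and move to the next utterance
--                 update_lexicon(lexicon, remainder)
--                 break
--     return lexicon
--
-- def get_bestmatch(matchedwords, lexicon):
--     """Given a set of words that matched the start of the utterance,
--     returns the one with the highest score
--     input:
--         matchedwords (set): a set of words from the lexicon
--         lexicon (dict str:int): a dictionary of words and scores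
--     return:
--         (str): return the word from matchedwords with the best score in the lexicon.
--                If two words are tied for best score, return the one with the fewest syllables"""
--     # Instructor solved this in 16 lines including the return
--     bestscore = -1 #changed to -1 from 0
--     bestword = ""
--     ### YOUR CODE HERE
--     for word in matchedwords:
--         score = lexicon[word]
--         syllcount = word.count(".") + 1
--         if score > bestscore or (score == bestscore and syllcount < bestword.count(".") + 1):
--             bestscore = score
--             bestword = word
--     return bestword
--
-- def update_lexicon(lexicon, word):
--     """Updates the lexicon with a word. Add it with score=1 if it's new, increment score if not new
--     input:
--         lexicon (dict str:int): dictionary of words and scores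
--         word (str): word to update lexicon with
--     return:
--        (none): lexicon is updated by reference"""
--     # Instructor solved this in 4 lines including the return
--     ### YOUR CODE HERE
--     if word in lexicon: #if word already in lexicon
--         lexicon[word] += 1 #reward: increment its score
--     else: lexicon[word] = 1 #else, add it with score of 1
--     return
--
-- def subtract(beststartword, utt):
--     """Removes word from beginning of utterance. Returns the remainder. Remember to remove any extra periods or whitespace from the ends
--     input:
--         beststartword (str): word to remove from start of utt
--         utt (str): utterance to remove beginning of
--     return:
--         (str): utterance with beststartword removed from the beginning. Remove any extra period or space from the ends"""
--     # Instructor solved this in 3 lines including the return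
--     remainder = ""
--     ### YOUR CODE HERE
--     #slice utt from len of beststartword to end,
--         #then strip leading ". " and trailing whitespace
--     remainder = utt[len(beststartword):].lstrip(". ").strip()
--     return remainder
-- ===== SOURCE B (Python) =====
-- def build_lexicon(utts):
--     """Lexicon-driven matcher: instead of enumerating the remainder's dot positions
--     and looking each stripped prefix up in the dict, each subtraction step scans the
--     lexicon entries themselves and tests each word directly against the start of the
--     remainder; the best-scored match (ties: fewer syllables) is unique, so the scan
--     order does not matter."""
--     lexicon = {}
--     for utt in utts:
--         remainder = utt
--         while remainder:
--             best = None  # (score, dots, word)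
--             for w, s in lexicon.items():
--                 if _matches(remainder, w) and (
--                         best is None or s > best[0]
--                         or (s == best[0] and w.count(".") < best[1])):
--                     best = (s, w.count("."), w)
--             if best is None:
--                 lexicon[remainder] = lexicon.get(remainder, 0) + 1
--                 break
--             w = best[2]
--             lexicon[w] += 1
--             remainder = remainder[len(w):].lstrip(". ").strip()
--     return lexicon
--
-- def _matches(rem, w):
--     # w matches iff some dot-terminated prefix of rem strips to w, i.e.
--     # rem = <ws>* w <ws>* "." ...  with w nonempty and free of edge whitespace
--     if not w or w != w.strip():
--         return False
--     j = 0
--     while j < len(rem) and rem[j].isspace():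
--         j += 1
--     if not rem.startswith(w, j):
--         return False
--     k = j + len(w)
--     while k < len(rem) and rem[k].isspace():
--         k += 1
--     return k < len(rem) and rem[k] == "."
-- ===== Notes on version B (the rewrite author's own statement) =====
-- stated objective: alternative
-- what changed: A enumerates the remainder's dot positions, strips each prefix, looks it up in the dict, collects a set and then runs a second argmax pass; B inverts the search: it scans the lexicon entries themselves, tests each stored word directly against the start of the remainder (skip whitespace, literal word, whitespace, dot) and keeps the running best, which is sound because the best match is unique (matched words have pairwise distinct syllable counts).
import Mathlib
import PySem

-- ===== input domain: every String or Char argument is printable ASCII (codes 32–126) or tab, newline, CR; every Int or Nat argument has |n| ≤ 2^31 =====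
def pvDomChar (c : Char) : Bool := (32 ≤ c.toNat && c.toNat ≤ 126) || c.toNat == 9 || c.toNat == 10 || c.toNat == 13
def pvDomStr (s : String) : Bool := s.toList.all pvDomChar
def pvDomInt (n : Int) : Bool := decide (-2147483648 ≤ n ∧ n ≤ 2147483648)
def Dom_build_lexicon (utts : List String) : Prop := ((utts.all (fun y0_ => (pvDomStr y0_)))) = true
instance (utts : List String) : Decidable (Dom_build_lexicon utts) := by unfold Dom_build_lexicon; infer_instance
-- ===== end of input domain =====

-- B inverts A's inner search: instead of enumerating the remainder's dot positions and
-- looking each stripped prefix up in the dict, B scans the lexicon entries and tests each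
-- word directly against the start of the remainder (the best match is unique, so the scan
-- order does not matter); alternative decomposition, same asymptotic cost.

-- ===== PORT A =====

-- remainder[:i].strip()  (A's candidate expression)
def pvCand (rem : List Char) (i : Int) : String :=
  String.ofList (PySem.Chars.strip (PySem.Chars.slice rem none (some i)))

-- subtract(beststartword, utt): utt[len(beststartword):].lstrip(". ").strip()
-- (identical line in Source A and Source B). lstrip(". ") has no PySem primitive: it drops
-- leading chars from {'.',' '}, which is exactly dropWhile (c == '.' || c == ' ') — exact.
def pvSubtract (best : String) (utt : List Char) : String :=
  String.ofList (PySem.Chars.strip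
    ((PySem.Chars.slice utt (some (PySem.Chars.len best.toList)) none).dropWhile
      (fun c => c == '.' || c == ' ')))

-- update_lexicon(lexicon, word)
def pvUpdateLexicon (lex : PySem.Dict String Int) (w : String) : PySem.Dict String Int :=
  match lex.get? w with
  | some v => lex.insert w (v + 1)
  | none   => lex.insert w 1

-- body of get_bestmatch's loop: state (bestscore, bestword).
-- Every word handed to get_bestmatch is a key of lexicon (it passed the
-- 'candidate in lexicon' test), so lexicon[word] never raises; getD w 0 is exact there.
def pvBestStep (lex : PySem.Dict String Int) (b : Int × String) (w : String) : Int × String :=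
  let score := lex.getD w 0
  let syllcount := PySem.Str.count w "." + 1
  if score > b.1 ∨ (score = b.1 ∧ syllcount < PySem.Str.count b.2 "." + 1) then (score, w) else b

-- get_bestmatch(matchedwords, lexicon): iteration order over the set is its
-- insertion order; no two distinct matched words can tie on (score, syllcount)
-- in A's calls, so the iteration order never influences A's result.
def pvGetBestmatch (matchedwords : PySem.Set String) (lex : PySem.Dict String Int) : String :=
  (List.foldl (pvBestStep lex) (-1, "") matchedwords).2

-- A's subtraction while-loop (fuel = len(remainder)+1 suffices: each matched step
-- strictly shortens the remainder, and otherwise the loop breaks)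
def pvLoopA (fuel : Nat) (lex : PySem.Dict String Int) (remainder : String) : PySem.Dict String Int :=
  match fuel with
  | 0 => lex
  | fuel + 1 =>
    let rem := remainder.toList
    if rem.isEmpty then lex
    else
      let syllindices : List Int :=
        ((PySem.List.enumerate rem 0).filter (fun p => p.2 == '.')).map (·.1)
      let matchedwords : PySem.Set String :=
        syllindices.foldl
          (fun M i =>
            let candidate := pvCand rem i
            if lex.contains candidate then PySem.Set.add M candidate else M)
          PySem.Set.empty
      if matchedwords.isEmpty then pvUpdateLexicon lex remainder
      else
        let beststartword := pvGetBestmatch matchedwords lex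
        pvLoopA fuel (pvUpdateLexicon lex beststartword) (pvSubtract beststartword rem)

def build_lexicon (utts : List String) : List (String × Int) :=
  (utts.foldl (fun lex utt => pvLoopA (utt.toList.length + 1) lex utt) PySem.Dict.empty).items

-- ===== PORT B =====

-- Source B's two index-advancing whitespace while-loops, as the same walk over the list tail
def pvSkipWs : List Char → List Char
  | [] => []
  | c :: t => if PySem.Chars.isspace c then pvSkipWs t else c :: t

-- _matches(rem, w): rem = <ws>* w <ws>* '.' …  with w nonempty and edge-whitespace-free;
-- the final 'k < len(rem) and rem[k] == "."' is: the first unskipped character is '.'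
def pvMatches (rem : List Char) (w : String) : Bool :=
  let wl := w.toList
  if wl.isEmpty || !(wl == PySem.Chars.strip wl) then false
  else
    let t := pvSkipWs rem
    if !(PySem.Chars.startswith t wl) then false
    else (pvSkipWs (t.drop wl.length)).head? == some '.'

-- body of Source B's for-loop over lexicon.items(): state best : Option (score, dots, word)
def pvScanStep (rem : List Char) (b : Option (Int × Nat × String)) (p : String × Int) :
    Option (Int × Nat × String) :=
  if pvMatches rem p.1 &&
      (match b with
       | none => true
       | some (bs, bd, _) =>
         decide (bs < p.2) || (decide (p.2 = bs) && decide (PySem.Str.count p.1 "." < bd)))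
  then some (p.2, PySem.Str.count p.1 ".", p.1)
  else b

-- B's subtraction while-loop (same fuel bound as A's port). best[2] is always an
-- existing key, so Source B's 'lexicon[w] += 1' never raises; getD is exact there.
def pvLoopB (fuel : Nat) (lex : PySem.Dict String Int) (remainder : String) : PySem.Dict String Int :=
  match fuel with
  | 0 => lex
  | fuel + 1 =>
    let rem := remainder.toList
    if rem.isEmpty then lex
    else
      match lex.items.foldl (pvScanStep rem) none with
      | none => lex.insert remainder (lex.getD remainder 0 + 1)
      | some (_, _, w) => pvLoopB fuel (lex.insert w (lex.getD w 0 + 1)) (pvSubtract w rem)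

def build_lexicon_alt (utts : List String) : List (String × Int) :=
  (utts.foldl (fun lex utt => pvLoopB (utt.toList.length + 1) lex utt) PySem.Dict.empty).items

-- ===== PRECONDITION & SPEC =====
def Spec_build_lexicon (utts : List String) (out : List (String × Int)) : Prop := out = build_lexicon_alt utts
instance (utts : List String) (out : List (String × Int)) : Decidable (Spec_build_lexicon utts out) := by unfold Spec_build_lexicon; infer_instance

-- ===== CLAIM (what is proved, stated in full; the proofs are below) =====
def Claim_equal_build_lexicon : Prop := ∀ (utts : List String), Dom_build_lexicon utts → Spec_build_lexicon utts (build_lexicon utts)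

-- ===== LEMMAS AND PROOFS =====

theorem pvSkipWs_eq (l : List Char) : pvSkipWs l = l.dropWhile PySem.Chars.isspace := by
  induction l with
  | nil => rfl
  | cons c t ih => simp only [pvSkipWs, List.dropWhile_cons]; split_ifs <;> simp_all

-- s.count(".") with a single-character needle is List.count
theorem pvCountGo_single (c : Char) :
    ∀ (l : List Char) (fuel acc : Nat), l.length ≤ fuel →
      PySem.Chars.count.go [c] fuel l acc = acc + l.count c := by
  intro l
  induction l with
  | nil => intro fuel acc _; cases fuel <;> simp [PySem.Chars.count.go]
  | cons h t ih =>
    intro fuel acc hf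
    cases fuel with
    | zero => simp at hf
    | succ fuel =>
      simp only [List.length_cons] at hf
      simp only [PySem.Chars.count.go]
      by_cases hc : h = c
      · subst hc
        have hpre : [h].isPrefixOf (h :: t) = true := by simp [List.isPrefixOf]
        rw [if_pos hpre]
        have hd : List.drop [h].length (h :: t) = t := by simp
        rw [hd, ih fuel (acc + 1) (by omega)]
        simp
        omega
      · have hpre : [c].isPrefixOf (h :: t) = false := by
          simp [List.isPrefixOf]
          exact fun hch => absurd hch.symm hc
        rw [hpre]
        simp only [Bool.false_eq_true, if_false]
        rw [ih fuel acc (by omega)]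
        have : (h == c) = false := by simp; exact fun hch => absurd hch hc
        simp [List.count_cons, this]

theorem pvCount_single (s : List Char) (c : Char) :
    PySem.Chars.count s [c] = s.count c := by
  simp only [PySem.Chars.count, List.isEmpty_cons, Bool.false_eq_true, if_false]
  simpa using pvCountGo_single c s s.length 0 le_rfl

theorem pvStrCount_dot (w : String) : PySem.Str.count w "." = w.toList.count '.' := by
  have : PySem.Str.count w "." = PySem.Chars.count w.toList ['.'] := rfl
  rw [this, pvCount_single]

-- ---- strip structure lemmas ----

theorem pvDropWhile_ws_append {a : List Char} (x : List Char)
    (ha : ∀ c ∈ a, PySem.Chars.isspace c = true) :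
    (a ++ x).dropWhile PySem.Chars.isspace = x.dropWhile PySem.Chars.isspace := by
  rw [List.dropWhile_append, List.dropWhile_eq_nil_iff.mpr ha]
  simp

theorem pvLstrip_ws_append {a : List Char} (x : List Char)
    (ha : ∀ c ∈ a, PySem.Chars.isspace c = true) :
    PySem.Chars.lstrip (a ++ x) = PySem.Chars.lstrip x := by
  simp only [PySem.Chars.lstrip]
  exact pvDropWhile_ws_append x ha

theorem pvRstrip_ws_append {b : List Char} (x : List Char)
    (hb : ∀ c ∈ b, PySem.Chars.isspace c = true) :
    PySem.Chars.rstrip (x ++ b) = PySem.Chars.rstrip x := by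
  simp only [PySem.Chars.rstrip, List.reverse_append]
  rw [pvDropWhile_ws_append x.reverse (by intro c hc; exact hb c (List.mem_reverse.mp hc))]

theorem pvRstrip_prefix (l : List Char) :
    ∃ b, l = PySem.Chars.rstrip l ++ b ∧ ∀ c ∈ b, PySem.Chars.isspace c = true := by
  refine ⟨(l.reverse.takeWhile PySem.Chars.isspace).reverse, ?_, ?_⟩
  · conv_lhs => rw [← l.reverse_reverse,
      ← List.takeWhile_append_dropWhile (p := PySem.Chars.isspace) (l := l.reverse)]
    rw [List.reverse_append]
    rfl
  · intro c hc
    exact List.mem_takeWhile_imp (List.mem_reverse.mp hc)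

theorem pvStrip_decomp (l : List Char) :
    ∃ a b, l = a ++ PySem.Chars.strip l ++ b ∧ (∀ c ∈ a, PySem.Chars.isspace c = true) ∧
      (∀ c ∈ b, PySem.Chars.isspace c = true) := by
  obtain ⟨b, hb, hbws⟩ := pvRstrip_prefix (PySem.Chars.lstrip l)
  refine ⟨l.takeWhile PySem.Chars.isspace, b, ?_, fun c hc => List.mem_takeWhile_imp hc, hbws⟩
  have h2 : List.dropWhile PySem.Chars.isspace l = PySem.Chars.strip l ++ b := hb
  rw [List.append_assoc, ← h2]
  exact (List.takeWhile_append_dropWhile).symm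

theorem pvLength_rstrip_le (l : List Char) : (PySem.Chars.rstrip l).length ≤ l.length := by
  simpa [PySem.Chars.rstrip] using List.length_dropWhile_le PySem.Chars.isspace l.reverse

theorem pvLstrip_self_of_strip {w : List Char} (h : PySem.Chars.strip w = w) :
    PySem.Chars.lstrip w = w := by
  have h1 : (PySem.Chars.lstrip w).length ≤ w.length := by
    simpa [PySem.Chars.lstrip] using List.length_dropWhile_le PySem.Chars.isspace w
  have h2 : (PySem.Chars.strip w).length ≤ (PySem.Chars.lstrip w).length := by
    simpa [PySem.Chars.strip] using pvLength_rstrip_le (PySem.Chars.lstrip w)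
  rw [h] at h2
  exact List.IsSuffix.eq_of_length
    (by simpa [PySem.Chars.lstrip] using List.dropWhile_suffix (l := w) PySem.Chars.isspace)
    (by omega)

theorem pvRstrip_self_of_strip {w : List Char} (h : PySem.Chars.strip w = w) :
    PySem.Chars.rstrip w = w := by
  have hl := pvLstrip_self_of_strip h
  calc PySem.Chars.rstrip w = PySem.Chars.strip w := by rw [PySem.Chars.strip, hl]
    _ = w := h

theorem pvDropWhile_head {p : Char → Bool} :
    ∀ {l : List Char} {c : Char} {t : List Char}, l.dropWhile p = c :: t → p c = false := by
  intro l
  induction l with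
  | nil => intro c t h; simp at h
  | cons a as ih =>
    intro c t h
    rw [List.dropWhile_cons] at h
    split_ifs at h with ha
    · exact ih h
    · cases h; simpa using ha

theorem pvLstrip_nonws_cons {c : Char} (t : List Char) (hc : PySem.Chars.isspace c = false) :
    PySem.Chars.lstrip (c :: t) = c :: t := by
  simp [PySem.Chars.lstrip, hc]

theorem pvRstrip_of_rev_head {w : List Char} {c : Char} {t : List Char}
    (hrev : w.reverse = c :: t) (hc : PySem.Chars.isspace c = false) :
    PySem.Chars.rstrip w = w := by
  simp only [PySem.Chars.rstrip, hrev, List.dropWhile_cons, hc, Bool.false_eq_true, if_false]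
  rw [← hrev, List.reverse_reverse]

theorem pvHead_not_ws_of_strip {w : List Char} {c : Char} {t : List Char}
    (hw : PySem.Chars.strip w = w) (hcons : w = c :: t) : PySem.Chars.isspace c = false := by
  have h := pvLstrip_self_of_strip hw
  rw [hcons] at h
  unfold PySem.Chars.lstrip at h
  exact pvDropWhile_head h

-- dropWhile over (w ++ x) with w stripped nonempty leaves everything in place
theorem pvDropWhile_stripped_append {w : List Char} (x : List Char)
    (hw : PySem.Chars.strip w = w) (hne : w ≠ []) :
    (w ++ x).dropWhile PySem.Chars.isspace = w ++ x := by
  cases hcons : w with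
  | nil => exact absurd hcons hne
  | cons c t =>
    have hc := pvHead_not_ws_of_strip hw hcons
    simp [hc]

-- strip of a whitespace sandwich
theorem pvStrip_sandwich {a b : List Char} (w : List Char)
    (ha : ∀ c ∈ a, PySem.Chars.isspace c = true) (hb : ∀ c ∈ b, PySem.Chars.isspace c = true)
    (hw : PySem.Chars.strip w = w) :
    PySem.Chars.strip (a ++ w ++ b) = w := by
  rcases eq_or_ne w [] with rfl | hne
  · simp only [List.append_nil]
    have h0 : PySem.Chars.lstrip (a ++ b) = [] := by
      simp only [PySem.Chars.lstrip]
      rw [List.dropWhile_eq_nil_iff]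
      intro c hc
      rcases List.mem_append.mp hc with h | h
      · exact ha c h
      · exact hb c h
    simp [PySem.Chars.strip, h0, PySem.Chars.rstrip]
  · rw [List.append_assoc, PySem.Chars.strip, pvLstrip_ws_append _ ha]
    have h1 : PySem.Chars.lstrip (w ++ b) = w ++ b := by
      simpa [PySem.Chars.lstrip] using pvDropWhile_stripped_append b hw hne
    rw [h1, pvRstrip_ws_append _ hb, pvRstrip_self_of_strip hw]

theorem pvStrip_idem (l : List Char) :
    PySem.Chars.strip (PySem.Chars.strip l) = PySem.Chars.strip l := by
  rcases eq_or_ne (PySem.Chars.strip l) [] with h | hne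
  · rw [h]
    simp [PySem.Chars.strip, PySem.Chars.lstrip, PySem.Chars.rstrip]
  · obtain ⟨b, hb, -⟩ := pvRstrip_prefix (PySem.Chars.lstrip l)
    have hbd : PySem.Chars.lstrip l = PySem.Chars.strip l ++ b := hb
    cases hc : PySem.Chars.strip l with
    | nil => exact absurd hc hne
    | cons c t =>
      have hdw : List.dropWhile PySem.Chars.isspace l = c :: (t ++ b) := by
        have h3 := hbd
        rw [hc] at h3
        unfold PySem.Chars.lstrip at h3
        simpa using h3
      have hcws := pvDropWhile_head hdw
      have h1 : PySem.Chars.lstrip (c :: t) = c :: t := pvLstrip_nonws_cons t hcws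
      have hrev : (c :: t).reverse
          = List.dropWhile PySem.Chars.isspace (PySem.Chars.lstrip l).reverse := by
        rw [← hc]
        show (PySem.Chars.rstrip (PySem.Chars.lstrip l)).reverse = _
        simp [PySem.Chars.rstrip]
      cases hrv : (c :: t).reverse with
      | nil => simp at hrv
      | cons dch u =>
        have hx : List.dropWhile PySem.Chars.isspace (PySem.Chars.lstrip l).reverse
            = dch :: u := by rw [← hrev, hrv]
        have h2 : PySem.Chars.rstrip (c :: t) = c :: t :=
          pvRstrip_of_rev_head hrv (pvDropWhile_head hx)
        show PySem.Chars.rstrip (PySem.Chars.lstrip (c :: t)) = c :: t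
        rw [h1, h2]

-- ---- match characterisation ----

def MatchSpec (rem wl : List Char) : Prop :=
  ∃ pre suf, rem = pre ++ '.' :: suf ∧ PySem.Chars.strip pre = wl

-- unfolded form of pvMatches
theorem pvMatches_eq_true_iff (rem : List Char) (w : String) :
    pvMatches rem w = true ↔
      (w.toList ≠ [] ∧ PySem.Chars.strip w.toList = w.toList ∧
        w.toList <+: rem.dropWhile PySem.Chars.isspace ∧
        ∃ u, ((rem.dropWhile PySem.Chars.isspace).drop w.toList.length).dropWhile
              PySem.Chars.isspace = '.' :: u) := by
  have hmain : pvMatches rem w =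
      (!w.toList.isEmpty && (w.toList == PySem.Chars.strip w.toList) &&
        PySem.Chars.startswith (rem.dropWhile PySem.Chars.isspace) w.toList &&
        (((rem.dropWhile PySem.Chars.isspace).drop w.toList.length).dropWhile
            PySem.Chars.isspace).head? == some '.') := by
    simp only [pvMatches, pvSkipWs_eq]
    cases h1 : w.toList.isEmpty <;>
      cases h2 : (w.toList == PySem.Chars.strip w.toList) <;>
      cases h3 : PySem.Chars.startswith (rem.dropWhile PySem.Chars.isspace) w.toList <;>
      simp
  rw [hmain]
  simp only [Bool.and_eq_true, Bool.not_eq_true', beq_iff_eq]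
  constructor
  · rintro ⟨⟨⟨hA, hB⟩, hC⟩, hD⟩
    refine ⟨?_, hB.symm, (PySem.Chars.startswith_iff _ _).mp hC, ?_⟩
    · intro hnil; rw [hnil] at hA; simp at hA
    · cases hd : ((rem.dropWhile PySem.Chars.isspace).drop w.toList.length).dropWhile
          PySem.Chars.isspace with
      | nil => rw [hd] at hD; simp at hD
      | cons c u =>
        rw [hd] at hD
        simp only [List.head?_cons, Option.some.injEq] at hD
        exact ⟨u, by rw [hD]⟩
  · rintro ⟨hne, hself, hpre, u, hu⟩
    refine ⟨⟨⟨?_, hself.symm⟩, (PySem.Chars.startswith_iff _ _).mpr hpre⟩, ?_⟩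
    · cases hl : w.toList with
      | nil => exact absurd hl hne
      | cons c t => rfl
    · rw [hu]; rfl

-- a dot index of rem is exactly a MatchSpec decomposition
theorem pvDotIdx_iff (rem wl : List Char) :
    (∃ k : Nat, ∃ h : k < rem.length, rem[k] = '.' ∧ PySem.Chars.strip (rem.take k) = wl)
      ↔ MatchSpec rem wl := by
  constructor
  · rintro ⟨k, hk, hdot, hstrip⟩
    refine ⟨rem.take k, rem.drop (k + 1), ?_, hstrip⟩
    conv_lhs => rw [← List.take_append_drop k rem]
    rw [List.drop_eq_getElem_cons hk, hdot]
  · rintro ⟨pre, suf, hdec, hstrip⟩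
    have hk : pre.length < rem.length := by subst hdec; simp
    refine ⟨pre.length, hk, ?_, ?_⟩
    · subst hdec; simp
    · subst hdec; rw [List.take_left]; exact hstrip

-- MatchSpec ↔ pvMatches
theorem pvMatches_iff (rem : List Char) (w : String) :
    pvMatches rem w = true ↔ (w.toList ≠ [] ∧ MatchSpec rem w.toList) := by
  rw [pvMatches_eq_true_iff]
  constructor
  · rintro ⟨hne, hself, ⟨t2, ht2⟩, u, hu⟩
    refine ⟨hne, ?_⟩
    have hrem : rem = rem.takeWhile PySem.Chars.isspace ++ (w.toList ++ t2) := by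
      rw [ht2]; exact (List.takeWhile_append_dropWhile).symm
    have hdropt2 : t2 = t2.takeWhile PySem.Chars.isspace ++ '.' :: u := by
      have h1 : (rem.dropWhile PySem.Chars.isspace).drop w.toList.length = t2 := by
        rw [← ht2, List.drop_left]
      rw [h1] at hu
      conv_lhs => rw [← List.takeWhile_append_dropWhile (p := PySem.Chars.isspace) (l := t2)]
      rw [hu]
    refine ⟨rem.takeWhile PySem.Chars.isspace ++ w.toList ++ t2.takeWhile PySem.Chars.isspace,
      u, ?_, ?_⟩
    · calc rem = rem.takeWhile PySem.Chars.isspace ++ (w.toList ++ t2) := hrem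
        _ = rem.takeWhile PySem.Chars.isspace
            ++ (w.toList ++ (t2.takeWhile PySem.Chars.isspace ++ '.' :: u)) := by
              rw [← hdropt2]
        _ = (rem.takeWhile PySem.Chars.isspace ++ w.toList ++ t2.takeWhile PySem.Chars.isspace)
            ++ '.' :: u := by simp [List.append_assoc]
    · exact pvStrip_sandwich w.toList (fun c hc => List.mem_takeWhile_imp hc)
        (fun c hc => List.mem_takeWhile_imp hc) hself
  · rintro ⟨hne, pre, suf, hdec, hstrip⟩
    have hself : PySem.Chars.strip w.toList = w.toList := by
      rw [← hstrip]; exact pvStrip_idem pre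
    obtain ⟨a, b, hpre, ha, hb⟩ := pvStrip_decomp pre
    rw [hstrip] at hpre
    have hrem : rem = a ++ (w.toList ++ (b ++ '.' :: suf)) := by
      rw [hdec, hpre]; simp [List.append_assoc]
    have hT : rem.dropWhile PySem.Chars.isspace = w.toList ++ (b ++ '.' :: suf) := by
      rw [hrem, pvDropWhile_ws_append _ ha]
      exact pvDropWhile_stripped_append _ hself hne
    refine ⟨hne, hself, ?_, suf, ?_⟩
    · rw [hT]; exact List.prefix_append _ _
    · rw [hT, List.drop_left, pvDropWhile_ws_append _ hb, List.dropWhile_cons]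
      simp [(by decide : PySem.Chars.isspace '.' = false)]

-- distinct matched words have distinct dot counts
theorem pvMatches_lt_count {rem : List Char} {w1 w2 : String}
    (h1 : pvMatches rem w1 = true) (h2 : pvMatches rem w2 = true)
    (hlt : w1.toList.length < w2.toList.length) :
    w1.toList.count '.' < w2.toList.count '.' := by
  rw [pvMatches_eq_true_iff] at h1 h2
  obtain ⟨hne1, hself1, hpre1, u1, hu1⟩ := h1
  obtain ⟨hne2, hself2, hpre2, u2, hu2⟩ := h2
  have hp12 : w1.toList <+: w2.toList :=
    List.prefix_of_prefix_length_le hpre1 hpre2 (le_of_lt hlt)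
  obtain ⟨r, hr⟩ := hp12
  have hrne : r ≠ [] := by
    intro h; rw [h, List.append_nil] at hr; rw [hr] at hlt; omega
  obtain ⟨t2, ht2⟩ := hpre2
  have hdrop1 : (rem.dropWhile PySem.Chars.isspace).drop w1.toList.length = r ++ t2 := by
    rw [← ht2, ← hr, List.append_assoc, List.drop_left]
  rw [hdrop1] at hu1
  have hrnw : ¬ (∀ c ∈ r, PySem.Chars.isspace c = true) := by
    intro hall
    have : PySem.Chars.rstrip w2.toList = PySem.Chars.rstrip w1.toList := by
      rw [← hr]; exact pvRstrip_ws_append _ hall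
    rw [pvRstrip_self_of_strip hself2] at this
    have hlen := pvLength_rstrip_le w1.toList
    rw [← this] at hlen
    omega
  have hdw : r.dropWhile PySem.Chars.isspace ≠ [] := by
    intro h; exact hrnw (List.dropWhile_eq_nil_iff.mp h)
  have hmem : '.' ∈ r := by
    cases hdr : r.dropWhile PySem.Chars.isspace with
    | nil => exact absurd hdr hdw
    | cons c0 r0 =>
      have : (r ++ t2).dropWhile PySem.Chars.isspace = c0 :: (r0 ++ t2) := by
        simp [List.dropWhile_append, hdr]
      rw [this] at hu1
      have hc0 : c0 = '.' := by
        have h := congrArg List.head? hu1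
        simpa using h
      have : c0 ∈ r := by
        have := List.dropWhile_sublist (l := r) PySem.Chars.isspace
        rw [hdr] at this
        exact this.subset List.mem_cons_self
      rwa [hc0] at this
  have hsum : w2.toList.count '.' = w1.toList.count '.' + r.count '.' := by
    rw [← hr, List.count_append]
  have hposc : 0 < r.count '.' := List.count_pos_iff.mpr hmem
  omega

theorem pvMatches_count_inj {rem : List Char} {w1 w2 : String}
    (h1 : pvMatches rem w1 = true) (h2 : pvMatches rem w2 = true)
    (hc : w1.toList.count '.' = w2.toList.count '.') : w1 = w2 := by
  rcases lt_trichotomy w1.toList.length w2.toList.length with hlt | heq | hgt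
  · exact absurd hc (by have := pvMatches_lt_count h1 h2 hlt; omega)
  · have hpre1 := ((pvMatches_eq_true_iff rem w1).mp h1).2.2.1
    have hpre2 := ((pvMatches_eq_true_iff rem w2).mp h2).2.2.1
    have : w1.toList <+: w2.toList := List.prefix_of_prefix_length_le hpre1 hpre2 (le_of_eq heq)
    have hl := this.eq_of_length heq
    have := congrArg String.ofList hl
    simpa using this
  · exact absurd hc.symm (by have := pvMatches_lt_count h2 h1 hgt; omega)

-- ---- A's matched set ----

-- 'w beats the running best b' — the comparison A's per-candidate step decides
def pvBetterP (lex : PySem.Dict String Int) (b : Int × String) (w : String) : Prop :=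
  lex.getD w 0 > b.1 ∨ (lex.getD w 0 = b.1 ∧ PySem.Str.count w "." + 1 < PySem.Str.count b.2 "." + 1)

-- A's per-enumerate-entry effect on the matched-word set, after fusing the
-- index-list comprehension and the set-building loop into one fold
def pvF (lex : PySem.Dict String Int) (rem : List Char)
    (M : PySem.Set String) (p : Int × Char) : PySem.Set String :=
  if p.2 == '.' then
    (if lex.contains (pvCand rem p.1) then PySem.Set.add M (pvCand rem p.1) else M)
  else M

def pvMatchedA (lex : PySem.Dict String Int) (rem : List Char) : PySem.Set String :=
  (PySem.List.enumerate rem 0).foldl (pvF lex rem) PySem.Set.empty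

-- A's set build (index comprehension + set loop) as one fold over the enumerate list
theorem pvSet_build_eq (lex : PySem.Dict String Int) (rem : List Char) :
    (((PySem.List.enumerate rem 0).filter (fun p => p.2 == '.')).map (·.1)).foldl
        (fun M i =>
          let candidate := pvCand rem i
          if lex.contains candidate then PySem.Set.add M candidate else M)
        PySem.Set.empty
      = pvMatchedA lex rem := by
  rw [List.foldl_map, List.foldl_filter]
  rfl

theorem pvMem_foldl_pvF (lex : PySem.Dict String Int) (rem : List Char) :
    ∀ (l : List (Int × Char)) (M : PySem.Set String) (w : String),
      w ∈ l.foldl (pvF lex rem) M ↔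
        w ∈ M ∨ ∃ p ∈ l, p.2 = '.' ∧ lex.contains (pvCand rem p.1) = true ∧ pvCand rem p.1 = w := by
  intro l
  induction l with
  | nil => intro M w; simp
  | cons p t ih =>
    intro M w
    simp only [List.foldl_cons, ih, List.mem_cons]
    constructor
    · rintro (hM | ⟨q, hq, hqs⟩)
      · unfold pvF at hM
        split_ifs at hM with hdot hcon
        · rcases (PySem.Set.mem_add _ _ _).mp hM with h | h
          · exact Or.inl h
          · exact Or.inr ⟨p, Or.inl rfl, by simpa using hdot, hcon, h.symm⟩
        · exact Or.inl hM
        · exact Or.inl hM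
      · exact Or.inr ⟨q, Or.inr hq, hqs⟩
    · rintro (hM | ⟨q, (rfl | hq), hdot, hcon, hval⟩)
      · left
        unfold pvF
        split_ifs with h1 h2
        · exact (PySem.Set.mem_add _ _ _).mpr (Or.inl hM)
        · exact hM
        · exact hM
      · left
        unfold pvF
        rw [if_pos (by simpa using hdot), if_pos hcon]
        exact (PySem.Set.mem_add _ _ _).mpr (Or.inr hval.symm)
      · exact Or.inr ⟨q, hq, hdot, hcon, hval⟩

theorem pvStr_toList_ne {w : String} (h : w ≠ "") : w.toList ≠ [] := by
  intro hl
  exact h (by have := congrArg String.ofList hl; simpa using this)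

theorem pvMem_matchedA (lex : PySem.Dict String Int) (rem : List Char)
    (hkey : "" ∉ lex.keys) (w : String) :
    w ∈ pvMatchedA lex rem ↔ w ∈ lex.keys ∧ pvMatches rem w = true := by
  unfold pvMatchedA
  rw [pvMem_foldl_pvF]
  constructor
  · rintro (hM | ⟨p, hp, hdot, hcon, hval⟩)
    · simp [PySem.Set.empty] at hM
    · obtain ⟨k, hk, hpk⟩ := (PySem.List.mem_enumerate_iff rem 0 p).mp hp
      have hp1 : p.1 = (k : Int) := by rw [hpk]; simp
      have hp2 : rem[k] = '.' := by rw [hpk] at hdot; simpa using hdot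
      have hcand : pvCand rem (k : Int) = w := by rw [← hp1]; exact hval
      have hwkeys : w ∈ lex.keys := by
        rw [hp1, hcand] at hcon
        exact (PySem.Dict.contains_iff_mem_keys lex w).mp hcon
      refine ⟨hwkeys, ?_⟩
      have hwne : w ≠ "" := fun h => hkey (h ▸ hwkeys)
      have hstrip : PySem.Chars.strip (rem.take k) = w.toList := by
        have : pvCand rem (k : Int) = String.ofList (PySem.Chars.strip (rem.take k)) := by
          unfold pvCand
          rw [PySem.Chars.slice_eq_listSlice, PySem.List.slice_to rem (by positivity)]
          simp
        rw [this] at hcand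
        have := congrArg String.toList hcand
        simpa using this
      rw [pvMatches_iff]
      exact ⟨pvStr_toList_ne hwne, (pvDotIdx_iff rem w.toList).mp ⟨k, hk, hp2, hstrip⟩⟩
  · rintro ⟨hwkeys, hmatch⟩
    obtain ⟨hne, hspec⟩ := (pvMatches_iff rem w).mp hmatch
    obtain ⟨k, hk, hdot, hstrip⟩ := (pvDotIdx_iff rem w.toList).mpr hspec
    right
    refine ⟨((k : Int), '.'), ?_, rfl, ?_, ?_⟩
    · rw [PySem.List.mem_enumerate_iff]
      exact ⟨k, hk, by simp [hdot]⟩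
    · have : pvCand rem (k : Int) = w := by
        unfold pvCand
        rw [PySem.Chars.slice_eq_listSlice, PySem.List.slice_to rem (by positivity)]
        simp [hstrip]
      rw [this]
      exact (PySem.Dict.contains_iff_mem_keys lex w).mpr hwkeys
    · unfold pvCand
      rw [PySem.Chars.slice_eq_listSlice, PySem.List.slice_to rem (by positivity)]
      simp [hstrip]

-- ---- A's best-match fold ----

theorem pvBestStep_pos (lex : PySem.Dict String Int) (b : Int × String) (w : String)
    (h : pvBetterP lex b w) : pvBestStep lex b w = (lex.getD w 0, w) := by
  unfold pvBetterP at h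
  simp only [pvBestStep]
  rw [if_pos h]

theorem pvBestStep_neg (lex : PySem.Dict String Int) (b : Int × String) (w : String)
    (h : ¬ pvBetterP lex b w) : pvBestStep lex b w = b := by
  unfold pvBetterP at h
  simp only [pvBestStep]
  rw [if_neg h]

theorem pvBetter_step (lex : PySem.Dict String Int) (b : Int × String) (w x : String)
    (h : ¬ pvBetterP lex b x) : ¬ pvBetterP lex (pvBestStep lex b w) x := by
  by_cases hb : pvBetterP lex b w
  · rw [pvBestStep_pos lex b w hb]; unfold pvBetterP at *; dsimp only at *; omega
  · rw [pvBestStep_neg lex b w hb]; exact h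

theorem pvBetter_self_step (lex : PySem.Dict String Int) (b : Int × String) (w : String) :
    ¬ pvBetterP lex (pvBestStep lex b w) w := by
  by_cases hb : pvBetterP lex b w
  · rw [pvBestStep_pos lex b w hb]; unfold pvBetterP; dsimp only; omega
  · rw [pvBestStep_neg lex b w hb]; exact hb

theorem pvFoldA_persist (lex : PySem.Dict String Int) :
    ∀ (t : List String) (b : Int × String) (y : String),
      ¬ pvBetterP lex b y → ¬ pvBetterP lex (t.foldl (pvBestStep lex) b) y := by
  intro t
  induction t with
  | nil => intro b y h; exact h
  | cons x xs ih =>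
    intro b y h
    exact ih _ y (pvBetter_step lex b x y h)

theorem pvFoldA_run (lex : PySem.Dict String Int) :
    ∀ (t : List String) (b : Int × String), b.1 = lex.getD b.2 0 →
      (t.foldl (pvBestStep lex) b).1 = lex.getD (t.foldl (pvBestStep lex) b).2 0 ∧
      ((t.foldl (pvBestStep lex) b).2 = b.2 ∨ (t.foldl (pvBestStep lex) b).2 ∈ t) ∧
      (∀ x ∈ t, ¬ pvBetterP lex (t.foldl (pvBestStep lex) b) x) := by
  intro t
  induction t with
  | nil => intro b hb; exact ⟨hb, Or.inl rfl, by simp⟩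
  | cons x xs ih =>
    intro b hb
    have hb' : (pvBestStep lex b x).1 = lex.getD (pvBestStep lex b x).2 0 := by
      by_cases h : pvBetterP lex b x
      · rw [pvBestStep_pos lex b x h]
      · rw [pvBestStep_neg lex b x h]; exact hb
    obtain ⟨ih1, ih2, ih3⟩ := ih (pvBestStep lex b x) hb'
    simp only [List.foldl_cons]
    refine ⟨ih1, ?_, ?_⟩
    · rcases ih2 with h | h
      · by_cases hbx : pvBetterP lex b x
        · have hx : (pvBestStep lex b x).2 = x := by rw [pvBestStep_pos lex b x hbx]
          exact Or.inr (List.mem_cons.mpr (Or.inl (h.trans hx)))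
        · have hx : (pvBestStep lex b x).2 = b.2 := by rw [pvBestStep_neg lex b x hbx]
          exact Or.inl (h.trans hx)
      · exact Or.inr (List.mem_cons_of_mem _ h)
    · intro y hy
      rcases List.mem_cons.mp hy with rfl | hyt
      · exact pvFoldA_persist lex xs _ y (pvBetter_self_step lex b y)
      · exact ih3 y hyt

theorem pvFoldA_char (lex : PySem.Dict String Int) (l : List String)
    (hpos : ∀ x ∈ l, 1 ≤ lex.getD x 0) (hne : l ≠ []) :
    (l.foldl (pvBestStep lex) (-1, "")).2 ∈ l ∧
    (l.foldl (pvBestStep lex) (-1, "")).1 = lex.getD (l.foldl (pvBestStep lex) (-1, "")).2 0 ∧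
    (∀ x ∈ l, ¬ pvBetterP lex (l.foldl (pvBestStep lex) (-1, "")) x) := by
  cases l with
  | nil => exact absurd rfl hne
  | cons x t =>
    have hbx : pvBetterP lex (-1, "") x := by
      unfold pvBetterP
      left
      have := hpos x List.mem_cons_self
      dsimp only
      omega
    have hstep : pvBestStep lex (-1, "") x = (lex.getD x 0, x) := pvBestStep_pos lex _ x hbx
    simp only [List.foldl_cons, hstep]
    obtain ⟨h1, h2, h3⟩ := pvFoldA_run lex t (lex.getD x 0, x) rfl
    refine ⟨?_, h1, ?_⟩
    · rcases h2 with h | h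
      · rw [h]; exact List.mem_cons_self
      · exact List.mem_cons_of_mem _ h
    · intro y hy
      rcases List.mem_cons.mp hy with rfl | hyt
      · exact pvFoldA_persist lex t _ y (by
          have := pvBetter_self_step lex (-1, "") y
          rwa [pvBestStep_pos lex _ y hbx] at this)
      · exact h3 y hyt

-- ---- B's scan fold ----

def pvBBetter (p : String × Int) (s : Int) (d : Nat) : Prop :=
  s < p.2 ∨ (p.2 = s ∧ PySem.Str.count p.1 "." < d)

def pvGoodB (rem : List Char) (l : List (String × Int)) (r : Option (Int × Nat × String)) : Prop :=
  (r = none ∧ ∀ p ∈ l, pvMatches rem p.1 = false) ∨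
  (∃ s d w, r = some (s, d, w) ∧ (w, s) ∈ l ∧ pvMatches rem w = true ∧
    d = PySem.Str.count w "." ∧ ∀ p ∈ l, pvMatches rem p.1 = true → ¬ pvBBetter p s d)

theorem pvScanStep_some_pos (rem : List Char) (p : String × Int) (s : Int) (d : Nat) (w : String)
    (hm : pvMatches rem p.1 = true) (hb : pvBBetter p s d) :
    pvScanStep rem (some (s, d, w)) p = some (p.2, PySem.Str.count p.1 ".", p.1) := by
  have hc : (decide (s < p.2) || (decide (p.2 = s) && decide (PySem.Str.count p.1 "." < d)))
      = true := by
    rcases hb with hb | ⟨hb1, hb2⟩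
    · rw [decide_eq_true hb]; simp
    · rw [decide_eq_true hb1, decide_eq_true hb2]; simp
  simp only [pvScanStep, hm, hc, Bool.true_and, if_true]

theorem pvScanStep_some_stay (rem : List Char) (p : String × Int) (s : Int) (d : Nat) (w : String)
    (h : pvMatches rem p.1 = false ∨ ¬ pvBBetter p s d) :
    pvScanStep rem (some (s, d, w)) p = some (s, d, w) := by
  rcases h with hm | hb
  · simp [pvScanStep, hm]
  · by_cases hm : pvMatches rem p.1 = true
    · have hc : (decide (s < p.2) || (decide (p.2 = s) && decide (PySem.Str.count p.1 "." < d)))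
          = false := by
        have h1 : ¬ s < p.2 := fun hx => hb (Or.inl hx)
        by_cases he : p.2 = s
        · have h3 : ¬ PySem.Str.count p.1 "." < d := fun hx => hb (Or.inr ⟨he, hx⟩)
          rw [decide_eq_false h1, decide_eq_false h3]
          simp
        · rw [decide_eq_false h1, decide_eq_false he]
          simp
      simp only [pvScanStep, hm, hc, Bool.true_and, Bool.false_eq_true, if_false]
    · have hm' : pvMatches rem p.1 = false := by revert hm; cases pvMatches rem p.1 <;> simp
      simp [pvScanStep, hm']

theorem pvScanStep_none_pos (rem : List Char) (p : String × Int)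
    (hm : pvMatches rem p.1 = true) :
    pvScanStep rem none p = some (p.2, PySem.Str.count p.1 ".", p.1) := by
  simp [pvScanStep, hm]

theorem pvScanStep_none_neg (rem : List Char) (p : String × Int)
    (hm : pvMatches rem p.1 = false) :
    pvScanStep rem none p = none := by
  simp [pvScanStep, hm]

theorem pvFoldB_good (rem : List Char) (l : List (String × Int)) :
    pvGoodB rem l (l.foldl (pvScanStep rem) none) := by
  induction l using List.reverseRecOn with
  | nil => exact Or.inl ⟨rfl, by simp⟩
  | append_singleton l x ih =>
    rw [List.foldl_append, List.foldl_cons, List.foldl_nil]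
    rcases ih with ⟨hnone, hall⟩ | ⟨s, d, w, hr, hmem, hmatch, hd, hmax⟩
    · rw [hnone]
      by_cases hm : pvMatches rem x.1 = true
      · rw [pvScanStep_none_pos rem x hm]
        refine Or.inr ⟨x.2, PySem.Str.count x.1 ".", x.1, rfl, by simp, hm, rfl, ?_⟩
        intro p hp hmp
        rcases List.mem_append.mp hp with hpl | hpx
        · rw [hall p hpl] at hmp; simp at hmp
        · have : p = x := by simpa using hpx
          subst this
          unfold pvBBetter
          omega
      · have hm' : pvMatches rem x.1 = false := by revert hm; cases pvMatches rem x.1 <;> simp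
        rw [pvScanStep_none_neg rem x hm']
        refine Or.inl ⟨rfl, ?_⟩
        intro p hp
        rcases List.mem_append.mp hp with hpl | hpx
        · exact hall p hpl
        · have : p = x := by simpa using hpx
          subst this
          exact hm'
    · rw [hr]
      by_cases hcond : pvMatches rem x.1 = true ∧ pvBBetter x s d
      · rw [pvScanStep_some_pos rem x s d w hcond.1 hcond.2]
        refine Or.inr ⟨x.2, PySem.Str.count x.1 ".", x.1, rfl, by simp, hcond.1, rfl, ?_⟩
        intro p hp hmp
        rcases List.mem_append.mp hp with hpl | hpx
        · have hold := hmax p hpl hmp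
          obtain ⟨-, hbet⟩ := hcond
          unfold pvBBetter at *
          subst hd
          omega
        · have : p = x := by simpa using hpx
          subst this
          unfold pvBBetter
          omega
      · have hstay : pvMatches rem x.1 = false ∨ ¬ pvBBetter x s d := by
          by_cases hm : pvMatches rem x.1 = true
          · exact Or.inr (fun hb => hcond ⟨hm, hb⟩)
          · exact Or.inl (by revert hm; cases pvMatches rem x.1 <;> simp)
        rw [pvScanStep_some_stay rem x s d w hstay]
        refine Or.inr ⟨s, d, w, rfl, List.mem_append.mpr (Or.inl hmem), hmatch, hd, ?_⟩
        intro p hp hmp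
        rcases List.mem_append.mp hp with hpl | hpx
        · exact hmax p hpl hmp
        · have : p = x := by simpa using hpx
          subst this
          intro hb
          rcases hstay with hstay | hstay
          · rw [hmp] at hstay; simp at hstay
          · exact hstay hb

-- ---- the per-step equality ----

def pvInv (lex : PySem.Dict String Int) : Prop :=
  lex.keys.Nodup ∧ "" ∉ lex.keys ∧ ∀ p ∈ lex.items, 1 ≤ p.2

theorem pvInv_getD (lex : PySem.Dict String Int) (hinv : pvInv lex) {w : String}
    (hw : w ∈ lex.keys) : 1 ≤ lex.getD w 0 ∧ (w, lex.getD w 0) ∈ lex.items := by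
  obtain ⟨hnodup, -, hval⟩ := hinv
  have hcon : lex.contains w = true := (PySem.Dict.contains_iff_mem_keys lex w).mpr hw
  rw [PySem.Dict.contains_eq_isSome_get?] at hcon
  obtain ⟨v, hv⟩ := Option.isSome_iff_exists.mp hcon
  have hitems : (w, v) ∈ lex.items := (PySem.Dict.get?_eq_some_iff_mem_items lex w v hnodup).mp hv
  have hg : lex.getD w 0 = v := by rw [PySem.Dict.getD_eq_get?_getD, hv]; rfl
  exact ⟨by rw [hg]; exact hval _ hitems, by rw [hg]; exact hitems⟩

-- the scan over the lexicon finds a match iff A's candidate set is nonempty, and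
-- then it finds exactly A's best word
theorem pvStep_agree (lex : PySem.Dict String Int) (rem : List Char) (hinv : pvInv lex) :
    ((lex.items.foldl (pvScanStep rem) none = none ↔ (pvMatchedA lex rem).isEmpty = true)) ∧
    (∀ s d w, lex.items.foldl (pvScanStep rem) none = some (s, d, w) →
      pvGetBestmatch (pvMatchedA lex rem) lex = w) := by
  obtain ⟨hnodup, hkey, hval⟩ := hinv
  have hgood := pvFoldB_good rem lex.items
  constructor
  · constructor
    · intro hnone
      rcases hgood with ⟨-, hall⟩ | ⟨s, d, w, hr, -⟩
      · rw [List.isEmpty_iff, List.eq_nil_iff_forall_not_mem]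
        intro w hw
        obtain ⟨hwk, hwm⟩ := (pvMem_matchedA lex rem hkey w).mp hw
        obtain ⟨-, hitems⟩ := pvInv_getD lex ⟨hnodup, hkey, hval⟩ hwk
        rw [hall _ hitems] at hwm
        simp at hwm
      · rw [hnone] at hr; simp at hr
    · intro hempty
      rcases hgood with ⟨hn, -⟩ | ⟨s, d, w, hr, hmem, hmatch, -⟩
      · exact hn
      · exfalso
        have hw : w ∈ pvMatchedA lex rem := by
          rw [pvMem_matchedA lex rem hkey]
          exact ⟨PySem.Dict.mem_keys_of_mem_items _ hmem, hmatch⟩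
        rw [List.isEmpty_iff] at hempty
        rw [hempty] at hw
        simp at hw
  · intro s d w hr
    rcases hgood with ⟨hn, -⟩ | ⟨s', d', w', hr', hmem, hmatch, hd, hmax⟩
    · rw [hn] at hr; simp at hr
    · rw [hr] at hr'
      simp only [Option.some.injEq, Prod.mk.injEq] at hr'
      obtain ⟨rfl, rfl, rfl⟩ := hr'
      -- A's fold over the matched set
      have hwA : w ∈ pvMatchedA lex rem := by
        rw [pvMem_matchedA lex rem hkey]
        exact ⟨PySem.Dict.mem_keys_of_mem_items _ hmem, hmatch⟩
      have hMne : pvMatchedA lex rem ≠ [] := fun h => by rw [h] at hwA; simp at hwA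
      have hpos : ∀ x ∈ pvMatchedA lex rem, 1 ≤ lex.getD x 0 := by
        intro x hx
        obtain ⟨hxk, -⟩ := (pvMem_matchedA lex rem hkey x).mp hx
        exact (pvInv_getD lex ⟨hnodup, hkey, hval⟩ hxk).1
      obtain ⟨hAmem, hAval, hAmax⟩ := pvFoldA_char lex (pvMatchedA lex rem) hpos hMne
      set rA := (pvMatchedA lex rem).foldl (pvBestStep lex) (-1, "") with hrA
      obtain ⟨hAk, hAmatch⟩ := (pvMem_matchedA lex rem hkey rA.2).mp hAmem
      -- s is w's score
      have hs : lex.getD w 0 = s := by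
        have := PySem.Dict.getD_of_mem_items lex hmem hnodup 0
        exact this
      -- cross maximality
      have hAw := hAmax w hwA
      obtain ⟨hv1, hitemsA⟩ := pvInv_getD lex ⟨hnodup, hkey, hval⟩ hAk
      have hBw := hmax (rA.2, lex.getD rA.2 0) hitemsA hAmatch
      unfold pvBetterP at hAw
      unfold pvBBetter at hBw
      rw [hs] at hAw
      dsimp only at hAw hBw
      rw [hAval] at hAw
      subst hd
      have heqs : lex.getD rA.2 0 = s ∧
          PySem.Str.count rA.2 "." = PySem.Str.count w "." := by
        constructor <;> omega
      have : rA.2 = w := by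
        apply pvMatches_count_inj hAmatch hmatch
        rw [← pvStrCount_dot, ← pvStrCount_dot]
        exact heqs.2
      unfold pvGetBestmatch
      rw [← hrA]
      exact this

-- A's two dict-update shapes are the same pointwise update B performs
theorem pvUpdate_eq (lex : PySem.Dict String Int) (w : String) :
    pvUpdateLexicon lex w = lex.insert w (lex.getD w 0 + 1) := by
  unfold pvUpdateLexicon
  rw [PySem.Dict.getD_eq_get?_getD]
  cases h : lex.get? w <;> simp

theorem pvInv_insert (lex : PySem.Dict String Int) (hinv : pvInv lex) (w : String)
    (hw : w ≠ "") : pvInv (lex.insert w (lex.getD w 0 + 1)) := by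
  obtain ⟨hnodup, hkey, hval⟩ := hinv
  refine ⟨PySem.Dict.nodup_keys_insert lex w _ hnodup, ?_, ?_⟩
  · intro h
    rcases (PySem.Dict.mem_keys_insert lex w "" _).mp h with h | h
    · exact hw h.symm
    · exact hkey h
  · intro p hp
    rcases (PySem.Dict.mem_items_insert lex w _ p).mp hp with rfl | ⟨hp', -⟩
    · have h0 : 0 ≤ lex.getD w 0 := by
        by_cases hc : w ∈ lex.keys
        · have := (pvInv_getD lex ⟨hnodup, hkey, hval⟩ hc).1; omega
        · rw [PySem.Dict.getD_eq_get?_getD]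
          cases hg : lex.get? w with
          | none => simp
          | some v =>
            have hcon : lex.contains w = true := by
              rw [PySem.Dict.contains_eq_isSome_get?, hg]; rfl
            exact absurd ((PySem.Dict.contains_iff_mem_keys lex w).mp hcon) hc
      dsimp only
      omega
    · exact hval p hp'

-- the two loops coincide step for step
theorem pvLoopAB : ∀ (fuel : Nat) (lex : PySem.Dict String Int) (remainder : String),
    pvInv lex → pvLoopA fuel lex remainder = pvLoopB fuel lex remainder := by
  intro fuel
  induction fuel with
  | zero => intro lex remainder _; rfl
  | succ fuel ih =>
    intro lex remainder hinv
    simp only [pvLoopA, pvLoopB]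
    by_cases hemp : remainder.toList.isEmpty = true
    · rw [if_pos hemp, if_pos hemp]
    · rw [if_neg hemp, if_neg hemp]
      rw [pvSet_build_eq lex remainder.toList]
      obtain ⟨hiff, hsome⟩ := pvStep_agree lex remainder.toList hinv
      cases hr : lex.items.foldl (pvScanStep remainder.toList) none with
      | none =>
        rw [if_pos (hiff.mp hr), pvUpdate_eq]
      | some v =>
        obtain ⟨s, d, w⟩ := v
        have hbest := hsome s d w hr
        have hne : (pvMatchedA lex remainder.toList).isEmpty ≠ true := by
          intro h
          rw [hiff.mpr h] at hr
          simp at hr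
        rw [if_neg hne, hbest, pvUpdate_eq]
        apply ih
        apply pvInv_insert lex hinv w
        -- w is a key of lex, and "" never is
        have hwk : w ∈ lex.keys := by
          have hw : w ∈ pvMatchedA lex remainder.toList := by
            have hgood := pvFoldB_good remainder.toList lex.items
            rcases hgood with ⟨hn, -⟩ | ⟨s', d', w', hr', hmem, hmatch, -⟩
            · rw [hn] at hr; simp at hr
            · rw [hr] at hr'
              simp only [Option.some.injEq, Prod.mk.injEq] at hr'
              obtain ⟨rfl, rfl, rfl⟩ := hr'
              rw [pvMem_matchedA lex remainder.toList hinv.2.1]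
              exact ⟨PySem.Dict.mem_keys_of_mem_items _ hmem, hmatch⟩
          exact ((pvMem_matchedA lex remainder.toList hinv.2.1 w).mp hw).1
        exact fun h => hinv.2.1 (h ▸ hwk)

theorem pvLoopA_inv : ∀ (fuel : Nat) (lex : PySem.Dict String Int) (remainder : String),
    pvInv lex → pvInv (pvLoopA fuel lex remainder) := by
  intro fuel
  induction fuel with
  | zero => intro lex remainder h; exact h
  | succ fuel ih =>
    intro lex remainder hinv
    simp only [pvLoopA]
    by_cases hemp : remainder.toList.isEmpty = true
    · rw [if_pos hemp]; exact hinv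
    · rw [if_neg hemp]
      rw [pvSet_build_eq lex remainder.toList]
      by_cases hM : (pvMatchedA lex remainder.toList).isEmpty = true
      · rw [if_pos hM, pvUpdate_eq]
        apply pvInv_insert lex hinv
        intro h
        apply hemp
        rw [h]
        rfl
      · rw [if_neg hM]
        apply ih
        rw [pvUpdate_eq]
        have hMne : pvMatchedA lex remainder.toList ≠ [] := by
          intro h
          exact hM (by rw [h]; rfl)
        have hpos : ∀ x ∈ pvMatchedA lex remainder.toList, 1 ≤ lex.getD x 0 := by
          intro x hx
          obtain ⟨hxk, -⟩ := (pvMem_matchedA lex remainder.toList hinv.2.1 x).mp hx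
          exact (pvInv_getD lex hinv hxk).1
        obtain ⟨hAmem, -, -⟩ := pvFoldA_char lex (pvMatchedA lex remainder.toList) hpos hMne
        have hbk : pvGetBestmatch (pvMatchedA lex remainder.toList) lex ∈ lex.keys :=
          ((pvMem_matchedA lex remainder.toList hinv.2.1 _).mp hAmem).1
        apply pvInv_insert lex hinv
        exact fun h => hinv.2.1 (h ▸ hbk)

theorem pvInv_empty : pvInv PySem.Dict.empty := by
  refine ⟨?_, ?_, ?_⟩ <;> simp [PySem.Dict.empty, PySem.Dict.keys]

theorem pvFold_eq : ∀ (utts : List String) (lex : PySem.Dict String Int), pvInv lex →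
    utts.foldl (fun lex utt => pvLoopA (utt.toList.length + 1) lex utt) lex
      = utts.foldl (fun lex utt => pvLoopB (utt.toList.length + 1) lex utt) lex := by
  intro utts
  induction utts with
  | nil => intro lex _; rfl
  | cons u t ih =>
    intro lex hinv
    simp only [List.foldl_cons]
    rw [← pvLoopAB (u.toList.length + 1) lex u hinv]
    exact ih _ (pvLoopA_inv _ lex u hinv)

-- ===== VERDICT (by name: the statement is the Claim_ definition above) =====
theorem build_lexicon_spec : Claim_equal_build_lexicon := by
  intro utts _
  unfold Spec_build_lexicon build_lexicon build_lexicon_alt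
  rw [pvFold_eq utts PySem.Dict.empty pvInv_empty]
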